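-- pv_equiv track=rewrite | github.com/NEU-Simon-Shi/GMR | evaluation/srgr.py | _resolve_csv_score_key
-- ===== SOURCE A (Python) =====
-- def _resolve_csv_score_key(fieldnames: list[str]) -> str:
--     normalized = {name.lower().strip().replace(" ", "").replace("_", ""): name for name in fieldnames}
--     candidates = (
--         "semantic",
--         "semanticscore",
--         "semanticrelevance",
--         "score",
--         "value",
--         "weight",
--         "mean",
--         "avg",
--     )
--     for key in candidates:
--         if key in normalized:
--             return normalized[key]
--     raise ValueError(f"Could not find a semantic score column in CSV headers: {fieldnames}")
-- ===== SOURCE B (Python) =====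
-- def _resolve_csv_score_key(fieldnames: list[str]) -> str:
--     candidates = ("semantic", "semanticscore", "semanticrelevance", "score",
--                   "value", "weight", "mean", "avg")
--     best = None  # (priority rank, original header) of the best match so far
--     for name in fieldnames:
--         key = name.lower().strip().replace(" ", "").replace("_", "")
--         if key in candidates:
--             rank = candidates.index(key)
--             if best is None or rank <= best[0]:
--                 best = (rank, name)
--     if best is None:
--         raise ValueError(f"Could not find a semantic score column in CSV headers: {fieldnames}")
--     return best[1]
-- ===== Notes on version B (the rewrite author's own statement) =====
-- stated objective: alternative
-- what changed: B makes a single pass over the header list keeping an argmin accumulator (priority rank of the normalized name, with ties replaced so the last occurrence wins), instead of A's building a normalized dict and then looping over the candidate tuple with lookups.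
import Mathlib
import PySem

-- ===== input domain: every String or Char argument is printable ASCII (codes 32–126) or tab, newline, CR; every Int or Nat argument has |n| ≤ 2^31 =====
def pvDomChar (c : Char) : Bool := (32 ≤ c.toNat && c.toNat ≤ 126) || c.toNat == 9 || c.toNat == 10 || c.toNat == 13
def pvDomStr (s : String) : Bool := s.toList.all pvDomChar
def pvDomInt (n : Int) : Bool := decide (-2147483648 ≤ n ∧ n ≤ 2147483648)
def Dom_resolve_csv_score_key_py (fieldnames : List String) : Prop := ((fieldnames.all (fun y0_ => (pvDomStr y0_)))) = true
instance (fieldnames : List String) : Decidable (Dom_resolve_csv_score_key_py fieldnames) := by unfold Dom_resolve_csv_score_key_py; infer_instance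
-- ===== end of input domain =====

-- B replaces A's dict-then-candidate-loop by a single pass over the headers keeping the
-- best-priority match so far (alternative algorithm, no dict built).
-- A raises ValueError when no header normalizes to a candidate; those inputs are outside Pre_.

-- shared normalization: name.lower().strip().replace(" ", "").replace("_", "")
def pvNorm (s : String) : String :=
  PySem.Str.replace (PySem.Str.replace (PySem.Str.strip (PySem.Str.lower s)) " " "") "_" ""

def pvCandidates : List String :=
  ["semantic", "semanticscore", "semanticrelevance", "score", "value", "weight", "mean", "avg"]

-- ===== PORT A =====
-- for key in candidates: if key in normalized: return normalized[key]
def pvALoop (normalized : PySem.Dict String String) : List String → String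
  | [] => ""          -- unreachable under Pre_: Python raises ValueError here
  | k :: ks => if normalized.contains k then normalized.getD k "" else pvALoop normalized ks

def resolve_csv_score_key_py (fieldnames : List String) : String :=
  let normalized := fieldnames.foldl (fun d n => d.insert (pvNorm n) n) PySem.Dict.empty
  pvALoop normalized pvCandidates

-- ===== PORT B =====
-- one pass: best = None; for name: if key in candidates and (best is None or rank <= best[0]): best = (rank, name)
def pvStep (best : Option (Nat × String)) (name : String) : Option (Nat × String) :=
  let key := pvNorm name
  if pvCandidates.contains key then
    let rank := (PySem.List.index? pvCandidates key).getD 0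
    match best with
    | none => some (rank, name)
    | some (br, bn) => if rank ≤ br then some (rank, name) else some (br, bn)
  else best

def resolve_csv_score_key_py_alt (fieldnames : List String) : String :=
  match fieldnames.foldl pvStep none with
  | some (_, v) => v
  | none => ""      -- unreachable under Pre_: Python raises ValueError here

-- ===== PRECONDITION & SPEC =====
-- Pre_ excludes exactly the inputs where A raises ValueError: no header normalizes to a candidate.
def Pre_resolve_csv_score_key_py (fieldnames : List String) : Prop :=
  ∃ n ∈ fieldnames, pvNorm n ∈ pvCandidates
instance (fieldnames : List String) : Decidable (Pre_resolve_csv_score_key_py fieldnames) := by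
  unfold Pre_resolve_csv_score_key_py; infer_instance

def pvWitness_resolve_csv_score_key_py : List String := ["Semantic Score"]

def Spec_resolve_csv_score_key_py (fieldnames : List String) (out : String) : Prop :=
  out = resolve_csv_score_key_py_alt fieldnames
instance (fieldnames : List String) (out : String) : Decidable (Spec_resolve_csv_score_key_py fieldnames out) := by
  unfold Spec_resolve_csv_score_key_py; infer_instance

-- ===== CLAIM =====
def Claim_equal_resolve_csv_score_key_py : Prop := ∀ (fieldnames : List String), Dom_resolve_csv_score_key_py fieldnames → Pre_resolve_csv_score_key_py fieldnames → Spec_resolve_csv_score_key_py fieldnames (resolve_csv_score_key_py fieldnames)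

-- ===== LEMMAS AND PROOFS =====
-- All loop lemmas are stated for an ABSTRACT normalization f (instantiated with pvNorm at the
-- end): this keeps the string functions from being unfolded during elaboration.

-- last header whose f-normalization equals k
def pvLastMatchF (f : String → String) (k : String) (fieldnames : List String) : Option String :=
  fieldnames.foldl (fun found n => if f n == k then some n else found) none

-- candidate-priority loop returning the last match of the first matching candidate
def pvBLoopF (f : String → String) (fieldnames : List String) : List String → String
  | [] => ""
  | k :: ks =>
    match pvLastMatchF f k fieldnames with
    | some v => v
    | none => pvBLoopF f fieldnames ks

-- A's dict lookup equals the last-match scan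
theorem get?_foldl_insert_norm (f : String → String) (xs : List String)
    (d : PySem.Dict String String) (k : String) :
    (xs.foldl (fun d n => d.insert (f n) n) d).get? k
      = xs.foldl (fun found n => if f n == k then some n else found) (d.get? k) := by
  induction xs generalizing d with
  | nil => rfl
  | cons x xs ih =>
    simp only [List.foldl_cons]
    rw [ih]
    suffices hh : (d.insert (f x) x).get? k
        = (if f x == k then some x else d.get? k) by rw [hh]
    rw [PySem.Dict.get?_insert]
    by_cases h : f x = k
    · rw [if_pos h.symm, if_pos (beq_iff_eq.mpr h)]
    · rw [if_neg (fun hh => h hh.symm), if_neg (fun hh => h (beq_iff_eq.mp hh))]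

theorem loops_eq (f : String → String) (normalized : PySem.Dict String String)
    (fieldnames : List String)
    (h : ∀ k, normalized.get? k = pvLastMatchF f k fieldnames) (cs : List String) :
    pvALoop normalized cs = pvBLoopF f fieldnames cs := by
  induction cs with
  | nil => rfl
  | cons c cs ih =>
    simp only [pvALoop, pvBLoopF, PySem.Dict.contains_eq_isSome_get?,
      PySem.Dict.getD_eq_get?_getD, h c]
    cases hm : pvLastMatchF f c fieldnames <;> simp [ih]

theorem a_eq_bloop (fieldnames : List String) :
    resolve_csv_score_key_py fieldnames = pvBLoopF pvNorm fieldnames pvCandidates := by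
  unfold resolve_csv_score_key_py
  apply loops_eq
  intro k
  rw [get?_foldl_insert_norm]
  rfl

theorem lastMatch_snoc (f : String → String) (k n : String) (xs : List String) :
    pvLastMatchF f k (xs ++ [n])
      = if f n == k then some n else pvLastMatchF f k xs := by
  simp [pvLastMatchF, List.foldl_append]

-- generic step with abstract normalization (pvStep = pvStepF pvNorm definitionally)
def pvStepF (f : String → String) (best : Option (Nat × String)) (name : String) :
    Option (Nat × String) :=
  let key := f name
  if pvCandidates.contains key then
    let rank := (PySem.List.index? pvCandidates key).getD 0
    match best with
    | none => some (rank, name)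
    | some (br, bn) => if rank ≤ br then some (rank, name) else some (br, bn)
  else best

-- invariant carried by B's fold
def pvInvF (f : String → String) (fieldnames : List String) : Option (Nat × String) → Prop
  | none => ∀ (j : Nat) (k : String), pvCandidates[j]? = some k → pvLastMatchF f k fieldnames = none
  | some (r, v) =>
      (∃ k, pvCandidates[r]? = some k ∧ pvLastMatchF f k fieldnames = some v) ∧
      ∀ (j : Nat), j < r → ∀ (k : String), pvCandidates[j]? = some k →
        pvLastMatchF f k fieldnames = none

theorem inv_fold (f : String → String) (fieldnames : List String) :
    pvInvF f fieldnames (fieldnames.foldl (pvStepF f) none) := by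
  induction fieldnames using List.reverseRecOn with
  | nil => simp only [List.foldl_nil, pvInvF]; intro j k hk; rfl
  | append_singleton xs n ih =>
    rw [List.foldl_append, List.foldl_cons, List.foldl_nil]
    have hnodup : pvCandidates.Nodup := by simp [pvCandidates]
    cases hc : pvCandidates.contains (f n) with
    | true =>
      have hmem : f n ∈ pvCandidates := List.contains_iff_mem.mp hc
      have hsome : (PySem.List.index? pvCandidates (f n)).isSome :=
        (PySem.List.index?_isSome_iff pvCandidates (f n)).mpr hmem
      obtain ⟨r, hr⟩ := Option.isSome_iff_exists.mp hsome
      obtain ⟨hrlt, hget, hfirst⟩ := PySem.List.getElem_of_index?_eq_some hr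
      have hstep : ∀ st, pvStepF f st n =
          match st with
          | none => some (r, n)
          | some (br, bn) => if r ≤ br then some (r, n) else some (br, bn) := by
        intro st
        simp only [pvStepF, hc, if_true, hr, Option.getD_some]
      -- preservation of "no match" for candidates other than f n
      have hpres : ∀ j k, j ≠ r → pvCandidates[j]? = some k →
          pvLastMatchF f k (xs ++ [n]) = pvLastMatchF f k xs := by
        intro j k hjr hk
        rw [lastMatch_snoc]
        have hjlt : j < pvCandidates.length := (List.getElem?_eq_some_iff.mp hk).1
        have hkj : pvCandidates[j] = k := (List.getElem?_eq_some_iff.mp hk).2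
        have hne : f n ≠ k := by
          intro he
          apply hjr
          have : pvCandidates[j] = pvCandidates[r] := by rw [hkj, hget, he]
          exact List.Nodup.getElem_inj_iff hnodup |>.mp this
        simp [hne]
      have hself : pvLastMatchF f (f n) (xs ++ [n]) = some n := by
        rw [lastMatch_snoc]; simp
      cases hst : xs.foldl (pvStepF f) none with
      | none =>
        rw [hst] at ih
        simp only [pvInvF] at ih
        rw [hstep]
        simp only [pvInvF]
        refine ⟨⟨f n, by simpa [hget] using List.getElem?_eq_getElem hrlt, hself⟩, ?_⟩
        intro j hj k hk
        rw [hpres j k (Nat.ne_of_lt hj) hk]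
        exact ih j k hk
      | some p =>
        obtain ⟨br, bn⟩ := p
        rw [hst] at ih
        simp only [pvInvF] at ih
        obtain ⟨⟨bk, hbk, hbm⟩, hlow⟩ := ih
        rw [hstep]
        show pvInvF f (xs ++ [n]) (if r ≤ br then some (r, n) else some (br, bn))
        by_cases hle : r ≤ br
        · rw [if_pos hle]
          simp only [pvInvF]
          refine ⟨⟨f n, by simpa [hget] using List.getElem?_eq_getElem hrlt, hself⟩, ?_⟩
          intro j hj k hk
          rw [hpres j k (Nat.ne_of_lt hj) hk]
          exact hlow j (Nat.lt_of_lt_of_le hj hle) k hk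
        · rw [if_neg hle]
          simp only [pvInvF]
          have hbrr : br ≠ r := fun he => hle (Nat.le_of_eq he.symm)
          refine ⟨⟨bk, hbk, ?_⟩, ?_⟩
          · rw [hpres br bk hbrr hbk]; exact hbm
          · intro j hj k hk
            have hjr : j ≠ r := by
              intro he; apply hle
              exact Nat.le_of_lt (he ▸ hj)
            rw [hpres j k hjr hk]
            exact hlow j hj k hk
    | false =>
      -- f n not a candidate: state unchanged, matches unchanged
      have hmem : f n ∉ pvCandidates := by
        intro hm
        have hcc := List.contains_iff_mem.mpr hm
        rw [hc] at hcc
        cases hcc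
      have hstep : pvStepF f (xs.foldl (pvStepF f) none) n = xs.foldl (pvStepF f) none := by
        simp only [pvStepF, hc, Bool.false_eq_true, if_false]
      rw [hstep]
      have hpres : ∀ k, k ∈ pvCandidates → pvLastMatchF f k (xs ++ [n]) = pvLastMatchF f k xs := by
        intro k hkmem
        rw [lastMatch_snoc]
        have hne : f n ≠ k := fun he => hmem (he ▸ hkmem)
        simp [hne]
      cases hst : xs.foldl (pvStepF f) none with
      | none =>
        rw [hst] at ih
        simp only [pvInvF] at ih ⊢
        intro j k hk
        rw [hpres k (List.mem_of_getElem? hk)]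
        exact ih j k hk
      | some p =>
        obtain ⟨br, bn⟩ := p
        rw [hst] at ih
        simp only [pvInvF] at ih ⊢
        obtain ⟨⟨bk, hbk, hbm⟩, hlow⟩ := ih
        refine ⟨⟨bk, hbk, by rw [hpres bk (List.mem_of_getElem? hbk)]; exact hbm⟩, ?_⟩
        intro j hj k hk
        rw [hpres k (List.mem_of_getElem? hk)]
        exact hlow j hj k hk

-- walking the candidate list under the invariant
theorem bloop_of_inv_some (f : String → String) (fieldnames : List String) (r : Nat) (v : String)
    (cs : List String)
    (hk : ∃ k, cs[r]? = some k ∧ pvLastMatchF f k fieldnames = some v)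
    (hlow : ∀ j, j < r → ∀ k, cs[j]? = some k → pvLastMatchF f k fieldnames = none) :
    pvBLoopF f fieldnames cs = v := by
  induction cs generalizing r with
  | nil => obtain ⟨k, hk, _⟩ := hk; simp at hk
  | cons c cs ih =>
    cases r with
    | zero =>
      obtain ⟨k, hk, hm⟩ := hk
      simp at hk
      subst hk
      simp [pvBLoopF, hm]
    | succ r =>
      have hc : pvLastMatchF f c fieldnames = none := hlow 0 (Nat.succ_pos r) c rfl
      simp only [pvBLoopF, hc]
      exact ih r (by simpa using hk) (fun j hj k hkk =>
        hlow (j + 1) (Nat.succ_lt_succ hj) k (by simpa using hkk))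

theorem bloop_of_inv_none (f : String → String) (fieldnames : List String) (cs : List String)
    (h : ∀ k, k ∈ cs → pvLastMatchF f k fieldnames = none) :
    pvBLoopF f fieldnames cs = "" := by
  induction cs with
  | nil => rfl
  | cons c cs ih =>
    simp only [pvBLoopF, h c (List.mem_cons_self)]
    exact ih (fun k hk => h k (List.mem_cons_of_mem c hk))

theorem pvStep_eq : pvStep = pvStepF pvNorm := rfl

theorem b_eq_bloop (fieldnames : List String) :
    resolve_csv_score_key_py_alt fieldnames = pvBLoopF pvNorm fieldnames pvCandidates := by
  unfold resolve_csv_score_key_py_alt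
  rw [pvStep_eq]
  have hinv := inv_fold pvNorm fieldnames
  cases hst : fieldnames.foldl (pvStepF pvNorm) none with
  | none =>
    rw [hst] at hinv
    simp only [pvInvF] at hinv
    exact (bloop_of_inv_none pvNorm fieldnames pvCandidates (fun k hk => by
      obtain ⟨j, hj, hkj⟩ := List.getElem_of_mem hk
      exact hinv j k (hkj ▸ List.getElem?_eq_getElem hj))).symm
  | some p =>
    obtain ⟨r, v⟩ := p
    rw [hst] at hinv
    simp only [pvInvF] at hinv
    exact (bloop_of_inv_some pvNorm fieldnames r v pvCandidates hinv.1 hinv.2).symm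

-- ===== VERDICT =====
theorem resolve_csv_score_key_py_spec : Claim_equal_resolve_csv_score_key_py := by
  intro fieldnames _ _
  unfold Spec_resolve_csv_score_key_py
  rw [a_eq_bloop, b_eq_bloop]
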